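-- pv_equiv track=rewrite | github.com/vandalord/tinierfish | agents/agent_3_alternative_sourcing.py | _normalize_risk_tags
-- ===== SOURCE A (Python) =====
-- def _normalize_risk_tags(tags: list[str]) -> set[str]:
--     normalized: set[str] = set()
--     for tag in tags:
--         lowered = tag.strip().lower()
--         if lowered in {"flood", "storm", "heatwave", "drought", "cyclone", "typhoon", "monsoon"}:
--             normalized.add("weather")
--         normalized.add(lowered)
--     return normalized
-- ===== SOURCE B (Python) =====
-- WEATHER = {"flood", "storm", "heatwave", "drought", "cyclone", "typhoon", "monsoon"}
--
--
-- def _normalize_risk_tags(tags: list[str]) -> set[str]: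
--     if not tags:
--         return set()
--     if len(tags) == 1:
--         low = tags[0].strip().lower()
--         return {"weather", low} if low in WEATHER else {low}
--     mid = len(tags) // 2
--     return _normalize_risk_tags(tags[:mid]) | _normalize_risk_tags(tags[mid:])
-- ===== Notes on version B (the rewrite author's own statement) =====
-- stated objective: alternative
-- what changed: Replaces A's single iterative loop maintaining one set with an in-loop branch by a divide-and-conquer recursion: a singleton is normalized directly (with 'weather' injected at the base case), halves are solved recursively and combined with set union.
import Mathlib
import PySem

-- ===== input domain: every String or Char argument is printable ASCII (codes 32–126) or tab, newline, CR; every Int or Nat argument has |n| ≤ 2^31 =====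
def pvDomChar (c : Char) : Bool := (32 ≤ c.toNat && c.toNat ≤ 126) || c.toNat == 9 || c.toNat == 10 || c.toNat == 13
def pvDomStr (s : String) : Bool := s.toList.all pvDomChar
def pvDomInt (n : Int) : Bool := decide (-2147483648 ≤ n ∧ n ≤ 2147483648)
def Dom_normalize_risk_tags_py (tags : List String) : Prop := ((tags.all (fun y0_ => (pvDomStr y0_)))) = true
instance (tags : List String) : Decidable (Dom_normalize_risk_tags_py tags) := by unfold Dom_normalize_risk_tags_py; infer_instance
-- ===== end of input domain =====

-- B replaces A's single loop (incremental set with an in-loop branch) by a divide-and-conquer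
-- recursion combining half-results with set union; a different decomposition, same cost in practice.

-- ===== PORT A =====
def normalize_risk_tags_py (tags : List String) : List String :=
  tags.foldl
    (fun normalized tag =>
      let lowered := PySem.Str.lower (PySem.Str.strip tag)
      let normalized :=
        if PySem.Set.contains
            (PySem.Set.ofList ["flood", "storm", "heatwave", "drought", "cyclone", "typhoon", "monsoon"])
            lowered
        then PySem.Set.add normalized "weather"
        else normalized
      PySem.Set.add normalized lowered)
    PySem.Set.empty

-- ===== PORT B =====
def pvWEATHER : PySem.Set String :=
  PySem.Set.ofList ["flood", "storm", "heatwave", "drought", "cyclone", "typhoon", "monsoon"]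

-- tags[:mid] / tags[mid:] are ported as List.take / List.drop, exact here since 0 ≤ mid ≤ len
-- (PySem.List.slice_to_natCast / slice_from_natCast).
def normalize_risk_tags_py_alt (tags : List String) : List String :=
  match tags with
  | [] => PySem.Set.empty
  | [t] =>
    let low := PySem.Str.lower (PySem.Str.strip t)
    if PySem.Set.contains pvWEATHER low then PySem.Set.ofList ["weather", low]
    else PySem.Set.ofList [low]
  | t1 :: t2 :: rest =>
    let mid := (t1 :: t2 :: rest).length / 2
    PySem.Set.union (normalize_risk_tags_py_alt ((t1 :: t2 :: rest).take mid))
                    (normalize_risk_tags_py_alt ((t1 :: t2 :: rest).drop mid))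
termination_by tags.length
decreasing_by
  · simp [List.length_take]; omega
  · simp [List.length_drop]; omega

-- ===== PRECONDITION & SPEC =====
def Spec_normalize_risk_tags_py (tags : List String) (out : List String) : Prop := out = normalize_risk_tags_py_alt tags
instance (tags : List String) (out : List String) : Decidable (Spec_normalize_risk_tags_py tags out) := by unfold Spec_normalize_risk_tags_py; infer_instance

-- ===== CLAIM (what is proved, stated in full; the proofs are below) =====
def Claim_equal_normalize_risk_tags_py : Prop := ∀ (tags : List String), Dom_normalize_risk_tags_py tags → Spec_normalize_risk_tags_py tags (normalize_risk_tags_py tags)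

-- ===== LEMMAS AND PROOFS =====

-- the flattened "event" sequence both programs insert, in order
def pvEvents (tags : List String) : List String :=
  (tags.map (fun tag => PySem.Str.lower (PySem.Str.strip tag))).flatMap
    (fun low => if PySem.Set.contains pvWEATHER low then ["weather", low] else [low])

-- one loop-body step of A equals folding Set.add over that tag's event chunk
theorem pv_step (s : PySem.Set String) (low : String) :
    PySem.Set.add (if PySem.Set.contains pvWEATHER low then PySem.Set.add s "weather" else s) low
      = (if PySem.Set.contains pvWEATHER low then ["weather", low] else [low]).foldl PySem.Set.add s := by
  cases h : PySem.Set.contains pvWEATHER low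
  · simp only [Bool.false_eq_true, if_false, List.foldl_cons, List.foldl_nil]
  · simp only [if_true, List.foldl_cons, List.foldl_nil]

-- A's fold over tags is the fold of Set.add over the event sequence, for any start set
theorem pv_fold_eq (tags : List String) :
    ∀ (s : PySem.Set String),
      tags.foldl
        (fun normalized tag =>
          PySem.Set.add
            (if PySem.Set.contains pvWEATHER (PySem.Str.lower (PySem.Str.strip tag))
             then PySem.Set.add normalized "weather" else normalized)
            (PySem.Str.lower (PySem.Str.strip tag))) s
      = (pvEvents tags).foldl PySem.Set.add s := by
  induction tags with
  | nil => intro s; simp [pvEvents]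
  | cons t ts ih =>
    intro s
    simp only [pvEvents, List.foldl_cons, List.map_cons, List.flatMap_cons, List.foldl_append]
    rw [ih, ← pv_step]
    rfl

-- so A's result is set(pvEvents tags)
theorem pv_A_eq (tags : List String) :
    normalize_risk_tags_py tags = PySem.Set.ofList (pvEvents tags) := by
  unfold normalize_risk_tags_py
  rw [PySem.Set.ofList_eq_foldl]
  exact pv_fold_eq tags PySem.Set.empty

-- adding into a set already containing x ignores all occurrences of x in the rest of the input
theorem pv_update_discard (x : String) (t : List String) :
    ∀ (s : PySem.Set String), x ∈ s →
      (t.filter (fun y => !(y == x))).foldl PySem.Set.add s = t.foldl PySem.Set.add s := by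
  induction t with
  | nil => intro s _; rfl
  | cons y t ih =>
    intro s hx
    by_cases h : y = x
    · subst h
      rw [List.filter_cons, if_neg (by simp), List.foldl_cons, PySem.Set.add_of_mem hx]
      exact ih s hx
    · rw [List.filter_cons, if_pos (by simp [h]), List.foldl_cons, List.foldl_cons]
      exact ih (PySem.Set.add s y) (by rw [PySem.Set.mem_add]; exact Or.inl hx)

-- folding Set.add over set(xs) is the same as folding it over xs
theorem pv_update_ofList (xs : List String) :
    ∀ (s : PySem.Set String),
      (PySem.Set.ofList xs).foldl PySem.Set.add s = xs.foldl PySem.Set.add s := by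
  induction xs with
  | nil => intro s; rfl
  | cons x xs ih =>
    intro s
    rw [PySem.Set.ofList_cons]
    simp only [List.foldl_cons, PySem.Set.discard]
    rw [pv_update_discard x (PySem.Set.ofList xs) (PySem.Set.add s x)
        (by rw [PySem.Set.mem_add]; exact Or.inr rfl)]
    exact ih (PySem.Set.add s x)

-- the event sequence splits along take/drop
theorem pv_events_split (tags : List String) (mid : Nat) :
    pvEvents tags = pvEvents (tags.take mid) ++ pvEvents (tags.drop mid) := by
  unfold pvEvents
  rw [← List.flatMap_append, ← List.map_append, List.take_append_drop]

-- B's recursion also computes set(pvEvents tags)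
theorem pv_B_eq (tags : List String) :
    normalize_risk_tags_py_alt tags = PySem.Set.ofList (pvEvents tags) := by
  induction tags using normalize_risk_tags_py_alt.induct with
  | case1 => rw [normalize_risk_tags_py_alt]; rfl
  | case2 t low h =>
    rw [normalize_risk_tags_py_alt]
    simp only [pvEvents, List.map_cons, List.map_nil, List.flatMap_cons, List.flatMap_nil,
      List.append_nil]
    split <;> rfl
  | case3 t low h =>
    rw [normalize_risk_tags_py_alt]
    simp only [pvEvents, List.map_cons, List.map_nil, List.flatMap_cons, List.flatMap_nil,
      List.append_nil]
    split <;> rfl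
  | case4 t1 t2 rest mid ih1 ih2 =>
    rw [normalize_risk_tags_py_alt, ih1, ih2,
      pv_events_split (t1 :: t2 :: rest) ((t1 :: t2 :: rest).length / 2),
      PySem.Set.ofList_append, PySem.Set.union, PySem.Set.update,
      pv_update_ofList, PySem.Set.update]

-- ===== VERDICT (by name: the statement is the Claim_ definition above) =====
theorem normalize_risk_tags_py_spec : Claim_equal_normalize_risk_tags_py := by
  intro tags _
  unfold Spec_normalize_risk_tags_py
  rw [pv_A_eq, pv_B_eq]
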